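-- pv_equiv track=rewrite | github.com/Revi1337/BaekJoon-Coding-Test | 백준/Silver/26215. 눈 치우기/눈 치우기.py | solution
-- ===== SOURCE A (Python) =====
-- def solution(N, snows):
--     sdict = dict(enumerate(snows))
--     timer = 0
--     while sdict:
--         skey = sorted(sdict, key=lambda k: -sdict[k])
--         counter = 0
--         clst = []
--         for k in skey:
--             if sdict[k] >= 1:
--                 counter += 1
--                 clst.append(k)
--                 if counter >= 2:
--                     break
--
--         if counter == 1:
--             k = clst[0]
--             sdict[k] -= 1
--             if sdict[k] == 0:
--                 sdict.pop(k)
--                 skey.remove(k)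
--         elif counter == 2:
--             for k in clst[:2]:
--                 sdict[k] -= 1
--                 if sdict[k] == 0:
--                     sdict.pop(k)
--                     skey.remove(k)
--
--         if counter != 0:
--             timer += 1
--         if timer > 1440:
--             return -1
--
--     return timer
-- ===== SOURCE B (Python) =====
-- def solution(N, snows):
--     if not snows:
--         return 0
--     t = max(max(snows), (sum(snows) + 1) // 2)
--     return t if t <= 1440 else -1
-- ===== Notes on version B (the rewrite author's own statement) =====
-- stated objective: faster
-- what changed: Replaced A's minute-by-minute greedy simulation (re-sorting the remaining piles every simulated minute and decrementing the two largest) by the closed form max(max(snows), ceil(sum(snows)/2)), returned directly and capped at 1440 -> -1; Pre_ excludes lists with a pile <= 0 (outside the task's natural domain), where A loops forever whenever the positive piles are exhausted before minute 1441 and otherwise returns -1 at the 1440-minute cap.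
-- outside the precondition, e.g. on solution(2, [0, 3000]): A returns -1, B returns -1; on solution(4, [1000, 1000, 1000, -1500]): A returns -1, B returns 1000; on solution(2, [0, 5]): A does not finish within the time limit, B returns 5
import Mathlib
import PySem

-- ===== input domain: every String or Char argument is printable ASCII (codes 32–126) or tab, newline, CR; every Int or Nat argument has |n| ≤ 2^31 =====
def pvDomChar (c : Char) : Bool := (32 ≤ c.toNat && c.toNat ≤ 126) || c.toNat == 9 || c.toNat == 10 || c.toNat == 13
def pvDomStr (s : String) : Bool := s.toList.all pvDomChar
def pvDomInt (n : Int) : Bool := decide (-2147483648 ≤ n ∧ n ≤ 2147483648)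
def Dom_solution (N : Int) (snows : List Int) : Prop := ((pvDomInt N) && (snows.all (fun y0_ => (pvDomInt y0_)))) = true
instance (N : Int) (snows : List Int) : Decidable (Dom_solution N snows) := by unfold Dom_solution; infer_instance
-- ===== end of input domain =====

-- B replaces A's minute-by-minute greedy simulation (re-sorting the piles every minute) by the
-- closed form max(max(snows), ceil(sum(snows)/2)) capped at 1440 -> -1; measurably faster.


-- ===== PORT A =====
-- the `for k in skey:` scan: counter += 1; clst.append(k); break at counter >= 2
def scanA (d : PySem.Dict Int Int) : List Int → Int → List Int → Int × List Int
  | [], counter, clst => (counter, clst)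
  | k :: rest, counter, clst =>
    -- sdict[k]: k comes from sorted(sdict), so the key is present (getD default never read)
    if 1 ≤ d.getD k 0 then
      if 2 ≤ counter + 1 then (counter + 1, clst ++ [k])
      else scanA d rest (counter + 1) (clst ++ [k])
    else scanA d rest counter clst

-- body of both update branches: sdict[k] -= 1; if sdict[k] == 0: sdict.pop(k)
-- (Python also does skey.remove(k); skey is a local rebuilt at the top of the next
--  iteration and not read again, so that statement has no effect on the result)
def decPop (d : PySem.Dict Int Int) (k : Int) : PySem.Dict Int Int :=
  let d1 := d.insert k (d.getD k 0 - 1)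
  if d1.getD k 0 = 0 then d1.erase k else d1

-- if counter == 1: … clst[0] …  elif counter == 2: for k in clst[:2]: …
-- (clst[0]: counter = len(clst) in A's scan, so clst is nonempty whenever counter == 1)
def updA (d : PySem.Dict Int Int) (counter : Int) (clst : List Int) : PySem.Dict Int Int :=
  if counter = 1 then decPop d (PySem.List.pyGetD clst 0 0)
  else if counter = 2 then (PySem.List.slice clst none (some 2)).foldl decPop d
  else d

-- if counter != 0: timer += 1
def tickA (timer counter : Int) : Int := if counter ≠ 0 then timer + 1 else timer

-- the `while sdict:` loop; fuel is only a termination guard: on Pre_ inputs every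
-- iteration increments timer and A returns -1 as soon as timer > 1440, so at most
-- 1441 iterations happen and fuel 1442 is never exhausted (proved in loopA_spec)
def loopA : Nat → PySem.Dict Int Int → Int → Int
  | 0, _, timer => timer
  | fuel+1, d, timer =>
    if d.size = 0 then timer
    else
      let sc := scanA d (PySem.List.sorted d.keys (fun k => -(d.getD k 0))) 0 []
      if 1440 < tickA timer sc.1 then -1
      else loopA fuel (updA d sc.1 sc.2) (tickA timer sc.1)

def solution (N : Int) (snows : List Int) : Int :=
  loopA 1442 (PySem.Dict.ofList (PySem.List.enumerate snows)) 0

-- ===== PORT B =====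
def solution_alt (N : Int) (snows : List Int) : Int :=
  if snows = [] then 0
  else
    -- max(snows): the list is nonempty here, so max? is some and the default is never read
    let t := max ((PySem.List.max? snows (fun x => x)).getD 0)
               (PySem.Int.floordiv (snows.sum + 1) 2)
    if t ≤ 1440 then t else -1

-- ===== PRECONDITION & SPEC =====
-- Pre_ excludes lists containing a pile ≤ 0, outside the task's natural domain: such an
-- entry can never reach 0 by the `-= 1` step guarded by `>= 1`, so it is never popped and
-- the dict never empties; A then loops forever whenever the positive piles are exhausted
-- before minute 1441, and otherwise returns -1 at the 1440-minute cap.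
def Pre_solution (N : Int) (snows : List Int) : Prop := ∀ x ∈ snows, 1 ≤ x
instance (N : Int) (snows : List Int) : Decidable (Pre_solution N snows) := by unfold Pre_solution; infer_instance

def pvWitness_solution : Int × List Int := (4, [3, 1, 2, 2])

def Spec_solution (N : Int) (snows : List Int) (out : Int) : Prop := out = solution_alt N snows
instance (N : Int) (snows : List Int) (out : Int) : Decidable (Spec_solution N snows out) := by unfold Spec_solution; infer_instance

-- ===== CLAIM (what is proved, stated in full; the proofs are below) =====
def Claim_equal_solution : Prop := ∀ (N : Int) (snows : List Int), Dom_solution N snows → Pre_solution N snows → Spec_solution N snows (solution N snows)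

-- ===== LEMMAS AND PROOFS =====

-- running maximum of a list of piles, initialised at 0
def lmax (l : List Int) : Int := l.foldl max 0

-- the closed-form measure: remaining minutes for a pile multiset
def fmeas (l : List Int) : Int := max (lmax l) ((l.sum + 1) / 2)

theorem foldl_max_init (l : List Int) (c : Int) (hc : 0 ≤ c) :
    l.foldl max c = max c (l.foldl max 0) := by
  induction l generalizing c with
  | nil => simp; omega
  | cons a l ih =>
    simp only [List.foldl_cons]
    rw [ih (max c a) (by omega), ih (max 0 a) (by omega)]
    rw [max_def, max_def (max 0 a) _, max_def c a, max_def (0:Int) a, max_def c _]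
    split_ifs <;> omega

theorem lmax_cons (a : Int) (l : List Int) : lmax (a :: l) = max (max 0 a) (lmax l) := by
  unfold lmax
  simp only [List.foldl_cons]
  exact foldl_max_init l (max 0 a) (by omega)

theorem lmax_nonneg (l : List Int) : 0 ≤ lmax l := by
  induction l with
  | nil => simp [lmax]
  | cons a l ih => rw [lmax_cons]; omega

theorem lmax_le {l : List Int} {b : Int} (h : ∀ x ∈ l, x ≤ b) (hb : 0 ≤ b) : lmax l ≤ b := by
  induction l with
  | nil => simp [lmax]; omega
  | cons a l ih =>
    rw [lmax_cons]
    have := h a (by simp)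
    have := ih (fun x hx => h x (by simp [hx]))
    omega

theorem sum_nonneg_pos {l : List Int} (h : ∀ x ∈ l, 1 ≤ x) : 0 ≤ l.sum := by
  induction l with
  | nil => simp
  | cons a l ih =>
    have := h a (by simp)
    have := ih (fun x hx => h x (by simp [hx]))
    simp only [List.sum_cons]; omega

theorem lmax_le_sum {l : List Int} (h : ∀ x ∈ l, 1 ≤ x) : lmax l ≤ l.sum := by
  induction l with
  | nil => simp [lmax]
  | cons a l ih =>
    rw [lmax_cons]
    have h1 := h a (by simp)
    have h2 := ih (fun x hx => h x (by simp [hx]))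
    have h3 := sum_nonneg_pos (fun x hx => h x (List.mem_cons_of_mem a hx))
    have h4 := lmax_nonneg l
    simp only [List.sum_cons]; omega

theorem lmax_perm {l l' : List Int} (h : l.Perm l') : lmax l = lmax l' := by
  induction h with
  | nil => rfl
  | cons x _ ih => rw [lmax_cons, lmax_cons, ih]
  | swap x y l => rw [lmax_cons, lmax_cons, lmax_cons, lmax_cons, max_left_comm]
  | trans _ _ ih1 ih2 => rw [ih1, ih2]

theorem lmax_append (l1 l2 : List Int) : lmax (l1 ++ l2) = max (lmax l1) (lmax l2) := by
  induction l1 with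
  | nil => simp only [List.nil_append, lmax]; simp only [List.foldl_nil]; rw [max_def]; have := lmax_nonneg l2; simp only [lmax] at this; split_ifs <;> omega
  | cons a l ih => simp only [List.cons_append]; rw [lmax_cons, lmax_cons, ih]; simp [max_assoc]

theorem lmax_nil : lmax [] = 0 := rfl

theorem fmeas_perm {l l' : List Int} (h : l.Perm l') : fmeas l = fmeas l' := by
  unfold fmeas; rw [lmax_perm h, h.sum_eq]

theorem fmeas_nil : fmeas [] = 0 := by decide

theorem fmeas_single {v : Int} (h : 1 ≤ v) : fmeas [v] = v := by
  unfold fmeas lmax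
  simp only [List.foldl_cons, List.foldl_nil, List.sum_cons, List.sum_nil]
  rw [max_def, max_def]
  split_ifs <;> omega

set_option maxHeartbeats 1600000 in
-- the key arithmetic fact: removing one unit from each of the two largest piles
-- lowers the measure by exactly one
theorem fmeas_step2 (v1 v2 : Int) (r : List Int) (h2 : 1 ≤ v2) (h12 : v2 ≤ v1)
    (hr : ∀ x ∈ r, 1 ≤ x ∧ x ≤ v2) :
    fmeas ((if v1 - 1 = 0 then [] else [v1 - 1]) ++ (if v2 - 1 = 0 then [] else [v2 - 1]) ++ r)
      = fmeas (v1 :: v2 :: r) - 1 := by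
  have hM0 : 0 ≤ lmax r := lmax_nonneg r
  have hMv2 : lmax r ≤ v2 := lmax_le (fun x hx => (hr x hx).2) (by omega)
  have hMS : lmax r ≤ r.sum := lmax_le_sum (fun x hx => (hr x hx).1)
  have hS0 : 0 ≤ r.sum := sum_nonneg_pos (fun x hx => (hr x hx).1)
  unfold fmeas
  split_ifs with hv1 hv2 hv2 <;>
    (simp only [List.nil_append, List.cons_append, List.singleton_append, List.append_nil,
       lmax_append, lmax_cons, lmax_nil, List.sum_cons, List.sum_append, List.sum_nil];
     simp only [max_def]; split_ifs <;> omega)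

-- ── Dict facts about erase and the decrement-and-pop step ──

theorem find?_filter_ne (items : List (Int × Int)) (k k' : Int) :
    Option.map Prod.snd (List.find? (fun p => p.1 == k') (items.filter (fun p => !(p.1 == k))))
      = if k' = k then none
        else Option.map Prod.snd (items.find? (fun p => p.1 == k')) := by
  induction items with
  | nil => simp
  | cons p rest ih =>
    by_cases h0 : k' = k
    · subst h0
      by_cases h1 : p.1 = k' <;> simp [List.filter_cons, List.find?_cons, h1, ih]
    · by_cases h1 : p.1 = k <;> by_cases h2 : p.1 = k' <;>
        simp_all [List.filter_cons, List.find?_cons]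

theorem get?_erase (d : PySem.Dict Int Int) (k k' : Int) :
    (d.erase k).get? k' = if k' = k then none else d.get? k' := by
  cases d with
  | mk items => simpa [PySem.Dict.erase, PySem.Dict.get?] using find?_filter_ne items k k'

theorem getD_erase (d : PySem.Dict Int Int) (k k' : Int) :
    (d.erase k).getD k' 0 = if k' = k then 0 else d.getD k' 0 := by
  rw [PySem.Dict.getD_eq_get?_getD, get?_erase]
  split_ifs <;> simp [PySem.Dict.getD_eq_get?_getD]

theorem keys_erase (d : PySem.Dict Int Int) (k : Int) :
    (d.erase k).keys = d.keys.filter (fun a => !(a == k)) := by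
  cases d with
  | mk items =>
    show (items.filter (fun p => !(p.1 == k))).map Prod.fst
        = (items.map Prod.fst).filter (fun a => !(a == k))
    induction items with
    | nil => rfl
    | cons p rest ih =>
      by_cases h1 : p.1 = k <;> simp [List.filter_cons, h1, ih]

theorem getD_decPop (d : PySem.Dict Int Int) (k k' : Int) :
    (decPop d k).getD k' 0
      = if k' = k then (if d.getD k 0 - 1 = 0 then 0 else d.getD k 0 - 1) else d.getD k' 0 := by
  by_cases hz : d.getD k 0 - 1 = 0 <;>
    by_cases hkk : k' = k <;>
      simp [decPop, PySem.Dict.getD_insert_self, PySem.Dict.getD_insert, getD_erase, hz, hkk]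

theorem keys_decPop (d : PySem.Dict Int Int) (k : Int) (hk : k ∈ d.keys) :
    (decPop d k).keys
      = if d.getD k 0 - 1 = 0 then d.keys.filter (fun a => !(a == k)) else d.keys := by
  have hc : d.contains k = true := (PySem.Dict.contains_iff_mem_keys d k).mpr hk
  have hkeys1 : (d.insert k (d.getD k 0 - 1)).keys = d.keys :=
    PySem.Dict.keys_insert_of_contains d _ hc
  have hkeys2 : (d.insert k 0).keys = d.keys := PySem.Dict.keys_insert_of_contains d 0 hc
  by_cases hz : d.getD k 0 - 1 = 0 <;>
    simp [decPop, PySem.Dict.getD_insert_self, hz, keys_erase, hkeys1, hkeys2]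

theorem nodup_keys_decPop (d : PySem.Dict Int Int) (k : Int) (hk : k ∈ d.keys)
    (hnd : d.keys.Nodup) : (decPop d k).keys.Nodup := by
  rw [keys_decPop d k hk]
  split_ifs
  · exact hnd.filter _
  · exact hnd

theorem getD_mem_values (d : PySem.Dict Int Int) (hnd : d.keys.Nodup) {k : Int}
    (hk : k ∈ d.keys) : d.getD k 0 ∈ d.values := by
  rw [PySem.Dict.values_eq_map_keys d hnd 0]
  exact List.mem_map_of_mem hk

-- scan evaluation on Pre_ inputs (every key present with a positive pile)
theorem scanA_one (d : PySem.Dict Int Int) (k1 : Int) (h1 : 1 ≤ d.getD k1 0) :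
    scanA d [k1] 0 [] = (1, [k1]) := by
  simp [scanA, h1]

theorem scanA_two (d : PySem.Dict Int Int) (k1 k2 : Int) (t : List Int)
    (h1 : 1 ≤ d.getD k1 0) (h2 : 1 ≤ d.getD k2 0) :
    scanA d (k1 :: k2 :: t) 0 [] = (2, [k1, k2]) := by
  simp [scanA, h1, h2]

theorem fmeas_nonneg (l : List Int) : 0 ≤ fmeas l :=
  le_trans (lmax_nonneg l) (le_max_left _ _)

-- decrementing (and popping at zero) the two top keys: the values as a multiset
theorem decPop2_values (d : PySem.Dict Int Int) (k1 k2 : Int) (t' : List Int)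
    (hnd : d.keys.Nodup)
    (hperm : (k1 :: k2 :: t').Perm d.keys)
    (hnodup : (k1 :: k2 :: t').Nodup) :
    (decPop (decPop d k1) k2).values.Perm
      ((if d.getD k1 0 - 1 = 0 then [] else [d.getD k1 0 - 1]) ++
       (if d.getD k2 0 - 1 = 0 then [] else [d.getD k2 0 - 1]) ++
       t'.map (fun x => d.getD x 0))
    ∧ (decPop (decPop d k1) k2).keys.Nodup := by
  have hk1m : k1 ∈ d.keys := hperm.subset (by simp)
  have hk2m : k2 ∈ d.keys := hperm.subset (by simp)
  have hk12 : k1 ≠ k2 := by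
    intro h; subst h; simp at hnodup
  have ht1 : ∀ x ∈ t', x ≠ k1 := by
    intro x hx h; subst h; simp at hnodup; tauto
  have ht2 : ∀ x ∈ t', x ≠ k2 := by
    intro x hx h; subst h; simp at hnodup; tauto
  have hnd1 : (decPop d k1).keys.Nodup := nodup_keys_decPop d k1 hk1m hnd
  have hkeys1 : (decPop d k1).keys
      = if d.getD k1 0 - 1 = 0 then d.keys.filter (fun a => !(a == k1)) else d.keys :=
    keys_decPop d k1 hk1m
  have hg1 : ∀ k', (decPop d k1).getD k' 0
      = if k' = k1 then (if d.getD k1 0 - 1 = 0 then 0 else d.getD k1 0 - 1) else d.getD k' 0 :=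
    getD_decPop d k1
  have hk2m1 : k2 ∈ (decPop d k1).keys := by
    rw [hkeys1]; split_ifs
    · simp [hk12.symm, hk2m]
    · exact hk2m
  have hgd1k2 : (decPop d k1).getD k2 0 = d.getD k2 0 := by
    rw [hg1]; simp [hk12.symm]
  have hnd2 : (decPop (decPop d k1) k2).keys.Nodup := nodup_keys_decPop _ k2 hk2m1 hnd1
  have hkeys2 : (decPop (decPop d k1) k2).keys
      = if d.getD k2 0 - 1 = 0 then (decPop d k1).keys.filter (fun a => !(a == k2))
        else (decPop d k1).keys := by
    rw [keys_decPop _ k2 hk2m1, hgd1k2]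
  have hg2 : ∀ k', (decPop (decPop d k1) k2).getD k' 0
      = if k' = k2 then (if d.getD k2 0 - 1 = 0 then 0 else d.getD k2 0 - 1)
        else (decPop d k1).getD k' 0 := by
    intro k'; rw [getD_decPop _ k2 k', hgd1k2]
  refine ⟨?_, hnd2⟩
  -- keys of the result, as a permutation of an explicit list
  have hKperm : (decPop (decPop d k1) k2).keys.Perm
      ((if d.getD k1 0 - 1 = 0 then [] else [k1]) ++
       (if d.getD k2 0 - 1 = 0 then [] else [k2]) ++ t') := by
    have hp0 : d.keys.Perm (k1 :: k2 :: t') := hperm.symm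
    have hf1 : ∀ (p : Int → Bool), (d.keys.filter p).Perm ((k1 :: k2 :: t').filter p) :=
      fun p => hp0.filter p
    have ht1' : t'.filter (fun a => !(a == k1)) = t' :=
      List.filter_eq_self.mpr (by intro x hx; simpa using ht1 x hx)
    have ht2' : t'.filter (fun a => !(a == k2)) = t' :=
      List.filter_eq_self.mpr (by intro x hx; simpa using ht2 x hx)
    rw [hkeys2, hkeys1]
    have e1 : List.filter (fun a => !(a == k1)) (k1 :: k2 :: t') = k2 :: t' := by
      simp [List.filter_cons, hk12.symm, ht1']
    have e2 : List.filter (fun a => !(a == k2)) (k2 :: t') = t' := by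
      simp [List.filter_cons, ht2']
    have e3 : List.filter (fun a => !(a == k2)) (k1 :: k2 :: t') = k1 :: t' := by
      simp [List.filter_cons, hk12, ht2']
    split_ifs with h1 h2 h2
    · have h := (hf1 (fun a => !(a == k1))).filter (fun a => !(a == k2))
      rw [e1, e2] at h
      simpa using h
    · have h := hf1 (fun a => !(a == k2))
      rw [e3] at h
      simpa using h
    · have h := hf1 (fun a => !(a == k1))
      rw [e1] at h
      simpa using h
    · simpa using hp0
  have hvals2 : (decPop (decPop d k1) k2).values
      = (decPop (decPop d k1) k2).keys.map (fun k => (decPop (decPop d k1) k2).getD k 0) :=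
    PySem.Dict.values_eq_map_keys _ hnd2 0
  rw [hvals2]
  refine (hKperm.map _).trans ?_
  have hmapt : t'.map (fun x => (decPop (decPop d k1) k2).getD x 0)
      = t'.map (fun x => d.getD x 0) := by
    apply List.map_congr_left
    intro x hx
    rw [hg2, if_neg (ht2 x hx), hg1, if_neg (ht1 x hx)]
  have hgk1 : (decPop (decPop d k1) k2).getD k1 0
      = if d.getD k1 0 - 1 = 0 then 0 else d.getD k1 0 - 1 := by
    rw [hg2, if_neg hk12, hg1, if_pos rfl]
  have hgk2 : (decPop (decPop d k1) k2).getD k2 0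
      = if d.getD k2 0 - 1 = 0 then 0 else d.getD k2 0 - 1 := by
    rw [hg2, if_pos rfl]
  split_ifs with h1 h2 h2 <;>
    simp [List.map_append, hmapt, hgk1, hgk2, h1, h2]

theorem tickA_one (timer : Int) : tickA timer 1 = timer + 1 := by norm_num [tickA]

theorem tickA_two (timer : Int) : tickA timer 2 = timer + 1 := by norm_num [tickA]

theorem updA_one (d : PySem.Dict Int Int) (k1 : Int) : updA d 1 [k1] = decPop d k1 := by
  simp [updA, PySem.List.pyGetD_zero_cons]

theorem updA_two (d : PySem.Dict Int Int) (k1 k2 : Int) :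
    updA d 2 [k1, k2] = decPop (decPop d k1) k2 := by
  norm_num [updA]
  simp [PySem.List.slice]

-- the main loop invariant
theorem loopA_spec (fuel : Nat) : ∀ (d : PySem.Dict Int Int) (timer : Int),
    d.keys.Nodup → (∀ v ∈ d.values, 1 ≤ v) → 0 ≤ timer → timer ≤ 1440 →
    1441 - timer ≤ (fuel : Int) →
    loopA fuel d timer = if timer + fmeas d.values ≤ 1440 then timer + fmeas d.values else -1 := by
  induction fuel with
  | zero =>
    intro d timer _ _ h0 h1440 hfuel
    exfalso; push_cast at hfuel; omega
  | succ fuel ih =>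
    intro d timer hnd hv h0 h1440 hfuel
    by_cases hsz : d.size = 0
    · have hitems : d.items = [] := List.length_eq_zero_iff.mp hsz
      have hvals : d.values = [] := by simp [PySem.Dict.values, hitems]
      simp only [loopA]
      rw [if_pos hsz, hvals, fmeas_nil, if_pos (by omega)]
      omega
    · have hkne : d.keys ≠ [] := by
        intro h
        have h2 : d.items = [] := List.map_eq_nil_iff.mp h
        exact hsz (by simp [PySem.Dict.size, h2])
      cases hsort : PySem.List.sorted d.keys (fun k => -(d.getD k 0)) with
      | nil => exact absurd ((PySem.List.sorted_eq_nil_iff _ _ _).mp hsort) hkne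
      | cons k1 t =>
        have hperm : (k1 :: t).Perm d.keys := by
          rw [← hsort]; exact PySem.List.sorted_perm _ _ _
        have hpos : ∀ x ∈ (k1 :: t), 1 ≤ d.getD x 0 :=
          fun x hx => hv _ (getD_mem_values d hnd (hperm.subset hx))
        have hnodup : (k1 :: t).Nodup := (hperm.nodup_iff).mpr hnd
        have hvperm : d.values.Perm ((k1 :: t).map (fun k => d.getD k 0)) := by
          rw [PySem.Dict.values_eq_map_keys d hnd 0]
          exact (hperm.map _).symm
        have hv1 : 1 ≤ d.getD k1 0 := hpos k1 (by simp)
        simp only [loopA]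
        rw [if_neg hsz, hsort]
        cases t with
        | nil =>
          simp only [scanA_one d k1 hv1]
          rw [tickA_one, updA_one]
          have hkeys : d.keys = [k1] := List.perm_singleton.mp hperm.symm
          have hk1m : k1 ∈ d.keys := by rw [hkeys]; simp
          have hvdvals : d.values = [d.getD k1 0] := by
            rw [PySem.Dict.values_eq_map_keys d hnd 0, hkeys]; simp
          have hnd' := nodup_keys_decPop d k1 hk1m hnd
          have hkeys' : (decPop d k1).keys = if d.getD k1 0 - 1 = 0 then [] else [k1] := by
            rw [keys_decPop d k1 hk1m, hkeys]
            split_ifs <;> simp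
          have hvals' : (decPop d k1).values
              = if d.getD k1 0 - 1 = 0 then [] else [d.getD k1 0 - 1] := by
            rw [PySem.Dict.values_eq_map_keys _ hnd' 0, hkeys']
            split_ifs with h <;> simp [getD_decPop, h]
          have hfm' : fmeas (decPop d k1).values = d.getD k1 0 - 1 := by
            rw [hvals']; split_ifs with h
            · rw [fmeas_nil]; omega
            · rw [fmeas_single (by omega)]
          have hfmd : fmeas d.values = d.getD k1 0 := by rw [hvdvals, fmeas_single hv1]
          have hvpos' : ∀ v ∈ (decPop d k1).values, 1 ≤ v := by
            rw [hvals']; split_ifs with h <;> simp <;> omega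
          rw [hfmd]
          by_cases hcap : 1440 < timer + 1
          · rw [if_pos hcap, if_neg (by omega)]
          · rw [if_neg hcap,
              ih (decPop d k1) (timer + 1) hnd' hvpos' (by omega) (by omega)
                (by push_cast at hfuel ⊢; omega), hfm']
            split_ifs <;> omega
        | cons k2 t' =>
          have hv2 : 1 ≤ d.getD k2 0 := hpos k2 (by simp)
          simp only [scanA_two d k1 k2 t' hv1 hv2]
          rw [tickA_two, updA_two]
          have hpw : List.Pairwise (fun a b => -(d.getD a 0) ≤ -(d.getD b 0)) (k1 :: k2 :: t') := by
            rw [← hsort]; exact PySem.List.sorted_pairwise _ _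
          have h21 : d.getD k2 0 ≤ d.getD k1 0 := by
            have := (List.pairwise_cons.mp hpw).1 k2 (by simp); omega
          have hts : ∀ x ∈ t', d.getD x 0 ≤ d.getD k2 0 := by
            intro x hx
            have := (List.pairwise_cons.mp (List.pairwise_cons.mp hpw).2).1 x hx; omega
          obtain ⟨hpermVals, hnd2⟩ := decPop2_values d k1 k2 t' hnd hperm hnodup
          have hr : ∀ x ∈ t'.map (fun x => d.getD x 0), 1 ≤ x ∧ x ≤ d.getD k2 0 := by
            intro x hx
            obtain ⟨y, hy, rfl⟩ := List.mem_map.mp hx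
            exact ⟨hpos y (by simp [hy]), hts y hy⟩
          have hstep := fmeas_step2 (d.getD k1 0) (d.getD k2 0)
            (t'.map (fun x => d.getD x 0)) hv2 h21 hr
          have hfmd : fmeas d.values
              = fmeas (d.getD k1 0 :: d.getD k2 0 :: t'.map (fun x => d.getD x 0)) := by
            refine fmeas_perm ?_
            simpa using hvperm
          have hfm2 : fmeas (decPop (decPop d k1) k2).values = fmeas d.values - 1 := by
            rw [fmeas_perm hpermVals, hstep, ← hfmd]
          have hvpos2 : ∀ v ∈ (decPop (decPop d k1) k2).values, 1 ≤ v := by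
            intro v hvmem
            have hm := hpermVals.subset hvmem
            split_ifs at hm with ha hb hb <;>
              simp only [List.nil_append, List.cons_append, List.singleton_append,
                List.mem_cons, List.mem_map] at hm <;>
              [skip; skip; skip; skip] <;>
              (try rcases hm with rfl | hm) <;>
              (try rcases hm with rfl | hm) <;>
              first
                | omega
                | (obtain ⟨y, hy, rfl⟩ := hm; exact hpos y (by simp [hy]))
          have hfm1 : 1 ≤ fmeas d.values := by
            have := fmeas_nonneg (decPop (decPop d k1) k2).values
            omega
          by_cases hcap : 1440 < timer + 1
          · rw [if_pos hcap, if_neg (by omega)]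
          · rw [if_neg hcap,
              ih _ (timer + 1) hnd2 hvpos2 (by omega) (by omega)
                (by push_cast at hfuel ⊢; omega), hfm2]
            split_ifs <;> omega

-- ===== VERDICT (by name: the statement is the Claim_ definition above) =====
theorem items_ofList_enumerate (snows : List Int) :
    (PySem.Dict.ofList (PySem.List.enumerate snows)).items = PySem.List.enumerate snows := by
  show (List.foldl (fun acc p => acc.insert p.1 p.2) PySem.Dict.empty
      (PySem.List.enumerate snows)).items = _
  rw [show (fun (acc : PySem.Dict Int Int) (p : Int × Int) => acc.insert p.1 p.2)
      = (fun d a => d.insert ((fun p => p.1) a) ((fun p => p.2) a)) from rfl]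
  rw [PySem.Dict.items_foldl_insert_fresh]
  · show PySem.Dict.empty.items ++ _ = _
    rw [show (PySem.Dict.empty : PySem.Dict Int Int).items = [] from rfl]
    simp
  · simp
  · rw [PySem.List.map_fst_enumerate]
    exact PySem.List.nodup_pyRange_one _ _

theorem solution_spec : Claim_equal_solution := by
  intro N snows _ hpre
  unfold Spec_solution
  have hitems := items_ofList_enumerate snows
  have hvals : (PySem.Dict.ofList (PySem.List.enumerate snows)).values = snows := by
    simp [PySem.Dict.values, hitems, PySem.List.map_snd_enumerate]
  have hnd := PySem.Dict.nodup_keys_ofList (PySem.List.enumerate snows)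
  have hvpos : ∀ v ∈ (PySem.Dict.ofList (PySem.List.enumerate snows)).values, 1 ≤ v := by
    rw [hvals]; exact hpre
  unfold solution
  rw [loopA_spec 1442 _ 0 hnd hvpos le_rfl (by norm_num) (by norm_num), hvals]
  cases snows with
  | nil => simp [solution_alt, fmeas_nil]
  | cons x ts =>
    have hx : 1 ≤ x := hpre x (by simp)
    have hl0 := lmax_nonneg ts
    have hfold := foldl_max_init ts x (by omega)
    have hfd : PySem.Int.floordiv ((x :: ts).sum + 1) 2 = ((x :: ts).sum + 1) / 2 :=
      PySem.Int.floordiv_eq_ediv_of_pos (by norm_num)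
    have hfm : fmeas (x :: ts) = max (max (max 0 x) (lmax ts)) (((x :: ts).sum + 1) / 2) := by
      unfold fmeas; rw [lmax_cons]
    unfold solution_alt
    rw [if_neg (show ¬(x :: ts = []) by simp), PySem.List.max?_id_cons]
    simp only [Option.getD_some]
    rw [hfold, hfd, hfm]
    unfold lmax
    simp only [List.sum_cons, max_def]
    split_ifs <;> omega
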